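-- pv_equiv track=rewrite | github.com/reganlu007/kaodata-1 | kaodata.py | convert_to_array1
-- ===== SOURCE A (Python) =====
-- def convert_to_array1(data_bytes):
--     array = []
--     it = iter(data_bytes)
--     for b1 in it:
--         b2 = next(it)
--         for i in range(7, -1, -1):
--             n = ((b1 >> i) & 1) * 2 + ((b2 >> i) & 1)
--             array.append(n)
--     return array
-- ===== SOURCE B (Python) =====
-- def convert_to_array1(data_bytes):
--     # Morton/bit-interleave lookup table: MORTON[v] spreads the 8 bits of v
--     # into the even base-4 digit positions.
--     MORTON = [sum(((v >> i) & 1) * 4 ** i for i in range(8)) for v in range(256)]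
--     bs = list(data_bytes)
--     out = []
--     for k in range(len(bs) // 2):
--         # one 16-bit interleaved word per byte pair; its 8 base-4 digits,
--         # most significant first, are the output values
--         m = 2 * MORTON[bs[2 * k] % 256] + MORTON[bs[2 * k + 1] % 256]
--         for i in range(7, -1, -1):
--             out.append((m >> (2 * i)) % 4)
--     return out
-- ===== Notes on version B (the rewrite author's own statement) =====
-- stated objective: alternative
-- what changed: A walks the 8 bits of each byte pair with per-bit shifts and masks; B precomputes a 256-entry Morton (bit-spreading) table, combines each byte pair into one 16-bit interleaved word 2*MORTON[b1%256]+MORTON[b2%256], and reads the output values off as that word's base-4 digits, most significant first.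
import Mathlib
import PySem

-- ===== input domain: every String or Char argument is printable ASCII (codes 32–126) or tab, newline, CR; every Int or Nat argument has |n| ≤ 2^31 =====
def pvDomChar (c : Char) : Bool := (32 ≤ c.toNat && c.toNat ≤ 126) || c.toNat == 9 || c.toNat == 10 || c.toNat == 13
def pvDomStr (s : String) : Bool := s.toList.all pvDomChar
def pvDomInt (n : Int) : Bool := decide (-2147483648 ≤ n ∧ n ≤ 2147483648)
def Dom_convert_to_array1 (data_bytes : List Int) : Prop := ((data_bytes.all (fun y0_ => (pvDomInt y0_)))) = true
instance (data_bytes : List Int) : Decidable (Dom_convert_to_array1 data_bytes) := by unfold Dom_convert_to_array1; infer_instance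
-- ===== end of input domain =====

-- B replaces A's per-bit shift/mask walk by a 256-entry Morton (bit-spreading) table:
-- each byte pair becomes one 16-bit interleaved word whose base-4 digits, most
-- significant first, are the outputs (objective: alternative, same cost).

-- ===== PORT A =====
-- inner loop 'for i in range(7,-1,-1): array.append(((b1>>i)&1)*2 + ((b2>>i)&1))';
-- i.toNat is exact: every i produced by range(7,-1,-1) is nonnegative
def aChunk (b1 b2 : Int) (acc : List Int) : List Int :=
  (PySem.List.pyRange 7 (-1) (-1)).foldl
    (fun a i => a ++ [PySem.Int.band (b1 >>> i.toNat) 1 * 2 + PySem.Int.band (b2 >>> i.toNat) 1]) acc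

-- 'for b1 in it: b2 = next(it); …'; on odd length Python raises StopIteration (outside Pre_)
def aLoop : List Int → List Int → List Int
  | acc, [] => acc
  | acc, [_] => acc
  | acc, b1 :: b2 :: rest => aLoop (aChunk b1 b2 acc) rest

def convert_to_array1 (data_bytes : List Int) : List Int := aLoop [] data_bytes

-- ===== PORT B =====
-- 'MORTON = [sum(((v >> i) & 1) * 4 ** i for i in range(8)) for v in range(256)]'
def mortonTable : List Int :=
  (PySem.List.pyRange 0 256 1).map (fun v =>
    (PySem.List.pyRange 0 8 1).foldl
      (fun a i => a + PySem.Int.band (v >>> i.toNat) 1 * 4 ^ i.toNat) 0)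

-- inner loop 'for i in range(7,-1,-1): out.append((m >> (2*i)) % 4)'
def bDigits (m : Int) (out : List Int) : List Int :=
  (PySem.List.pyRange 7 (-1) (-1)).foldl
    (fun o i => o ++ [PySem.Int.mod (m >>> (2 * i).toNat) 4]) out

-- 'for k in range(len(bs)//2): m = 2*MORTON[bs[2*k] % 256] + MORTON[bs[2*k+1] % 256]; <digit loop>'
-- (indices 2k, 2k+1 and the table indices are always in range, so pyGetD's default is never used)
def convert_to_array1_alt (data_bytes : List Int) : List Int :=
  (PySem.List.pyRange 0 (PySem.Int.floordiv (data_bytes.length : Int) 2) 1).foldl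
    (fun out k =>
      bDigits
        (2 * PySem.List.pyGetD mortonTable
               (PySem.Int.mod (PySem.List.pyGetD data_bytes (2 * k) 0) 256) 0
           + PySem.List.pyGetD mortonTable
               (PySem.Int.mod (PySem.List.pyGetD data_bytes (2 * k + 1) 0) 256) 0)
        out)
    []

-- ===== PRECONDITION & SPEC =====
-- Pre_ excludes odd-length inputs, on which Python A raises StopIteration (next(it) on an exhausted iterator)
def Pre_convert_to_array1 (data_bytes : List Int) : Prop := data_bytes.length % 2 = 0
instance (data_bytes : List Int) : Decidable (Pre_convert_to_array1 data_bytes) := by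
  unfold Pre_convert_to_array1; infer_instance
def pvWitness_convert_to_array1 : List Int := [200, 3, -7, 31]

def Spec_convert_to_array1 (data_bytes : List Int) (out : List Int) : Prop := out = convert_to_array1_alt data_bytes
instance (data_bytes : List Int) (out : List Int) : Decidable (Spec_convert_to_array1 data_bytes out) := by unfold Spec_convert_to_array1; infer_instance

-- ===== CLAIM (what is proved, stated in full; the proofs are below) =====
def Claim_equal_convert_to_array1 : Prop := ∀ (data_bytes : List Int), Dom_convert_to_array1 data_bytes → Pre_convert_to_array1 data_bytes → Spec_convert_to_array1 data_bytes (convert_to_array1 data_bytes)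

-- ===== LEMMAS AND PROOFS =====

-- the Morton-spread combination of two bytes, as a closed arithmetic expression
def mf (r : Int) : Int :=
  r % 2 + r / 2 % 2 * 4 + r / 4 % 2 * 16 + r / 8 % 2 * 64 + r / 16 % 2 * 256
    + r / 32 % 2 * 1024 + r / 64 % 2 * 4096 + r / 128 % 2 * 16384

-- base-4 digit extraction from a sum of bounded base-4 digits
lemma digit_extract (x0 x1 x2 x3 x4 x5 x6 x7 y0 y1 y2 y3 y4 y5 y6 y7 : Int)
    (hx0 : 0 ≤ x0 ∧ x0 ≤ 1) (hx1 : 0 ≤ x1 ∧ x1 ≤ 1) (hx2 : 0 ≤ x2 ∧ x2 ≤ 1) (hx3 : 0 ≤ x3 ∧ x3 ≤ 1)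
    (hx4 : 0 ≤ x4 ∧ x4 ≤ 1) (hx5 : 0 ≤ x5 ∧ x5 ≤ 1) (hx6 : 0 ≤ x6 ∧ x6 ≤ 1) (hx7 : 0 ≤ x7 ∧ x7 ≤ 1)
    (hy0 : 0 ≤ y0 ∧ y0 ≤ 1) (hy1 : 0 ≤ y1 ∧ y1 ≤ 1) (hy2 : 0 ≤ y2 ∧ y2 ≤ 1) (hy3 : 0 ≤ y3 ∧ y3 ≤ 1)
    (hy4 : 0 ≤ y4 ∧ y4 ≤ 1) (hy5 : 0 ≤ y5 ∧ y5 ≤ 1) (hy6 : 0 ≤ y6 ∧ y6 ≤ 1) (hy7 : 0 ≤ y7 ∧ y7 ≤ 1) :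
    let M := 2*(x0 + x1*4 + x2*16 + x3*64 + x4*256 + x5*1024 + x6*4096 + x7*16384)
      + (y0 + y1*4 + y2*16 + y3*64 + y4*256 + y5*1024 + y6*4096 + y7*16384)
    M / 16384 % 4 = x7 * 2 + y7 ∧ M / 4096 % 4 = x6 * 2 + y6 ∧ M / 1024 % 4 = x5 * 2 + y5 ∧
    M / 256 % 4 = x4 * 2 + y4 ∧ M / 64 % 4 = x3 * 2 + y3 ∧ M / 16 % 4 = x2 * 2 + y2 ∧
    M / 4 % 4 = x1 * 2 + y1 ∧ M % 4 = x0 * 2 + y0 := by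
  intro M
  refine ⟨?_, ?_, ?_, ?_, ?_, ?_, ?_, ?_⟩ <;> omega

-- table lookup at an in-range index is the closed spread expression
lemma morton_lookup (r : Int) (h0 : 0 ≤ r) (h1 : r < 256) :
    PySem.List.pyGetD mortonTable r 0 = mf r := by
  unfold mortonTable
  rw [PySem.List.pyGetD_map_pyRange_of_nonneg _ 256 r 0 h0 h1]
  simp only [(by decide : PySem.List.pyRange 0 8 1 = [0, 1, 2, 3, 4, 5, 6, 7]),
    List.foldl_cons, List.foldl_nil]
  simp only [PySem.Int.band_one, PySem.Int.mod_eq_emod_of_pos (by omega : (0:Int) < 2),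
    (by decide : Int.toNat 7 = 7), (by decide : Int.toNat 6 = 6),
    (by decide : Int.toNat 5 = 5), (by decide : Int.toNat 4 = 4),
    (by decide : Int.toNat 3 = 3), (by decide : Int.toNat 2 = 2),
    (by decide : Int.toNat 1 = 1), (by decide : Int.toNat 0 = 0),
    Int.shiftRight_eq_div_pow]
  unfold mf
  push_cast
  norm_num

-- the eight base-4 digits of the combined Morton word are A's bit pairs
lemma mfd7 (r1 r2 : Int) : (2 * mf r1 + mf r2) / 16384 % 4 = r1 / 128 % 2 * 2 + r2 / 128 % 2 := by
  obtain ⟨d, -⟩ := digit_extract (r1 % 2) (r1 / 2 % 2) (r1 / 4 % 2) (r1 / 8 % 2)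
    (r1 / 16 % 2) (r1 / 32 % 2) (r1 / 64 % 2) (r1 / 128 % 2)
    (r2 % 2) (r2 / 2 % 2) (r2 / 4 % 2) (r2 / 8 % 2)
    (r2 / 16 % 2) (r2 / 32 % 2) (r2 / 64 % 2) (r2 / 128 % 2)
    (by omega) (by omega) (by omega) (by omega) (by omega) (by omega) (by omega) (by omega)
    (by omega) (by omega) (by omega) (by omega) (by omega) (by omega) (by omega) (by omega)
  unfold mf; exact d

lemma mfd6 (r1 r2 : Int) : (2 * mf r1 + mf r2) / 4096 % 4 = r1 / 64 % 2 * 2 + r2 / 64 % 2 := by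
  obtain ⟨-, d, -⟩ := digit_extract (r1 % 2) (r1 / 2 % 2) (r1 / 4 % 2) (r1 / 8 % 2)
    (r1 / 16 % 2) (r1 / 32 % 2) (r1 / 64 % 2) (r1 / 128 % 2)
    (r2 % 2) (r2 / 2 % 2) (r2 / 4 % 2) (r2 / 8 % 2)
    (r2 / 16 % 2) (r2 / 32 % 2) (r2 / 64 % 2) (r2 / 128 % 2)
    (by omega) (by omega) (by omega) (by omega) (by omega) (by omega) (by omega) (by omega)
    (by omega) (by omega) (by omega) (by omega) (by omega) (by omega) (by omega) (by omega)
  unfold mf; exact d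

lemma mfd5 (r1 r2 : Int) : (2 * mf r1 + mf r2) / 1024 % 4 = r1 / 32 % 2 * 2 + r2 / 32 % 2 := by
  obtain ⟨-, -, d, -⟩ := digit_extract (r1 % 2) (r1 / 2 % 2) (r1 / 4 % 2) (r1 / 8 % 2)
    (r1 / 16 % 2) (r1 / 32 % 2) (r1 / 64 % 2) (r1 / 128 % 2)
    (r2 % 2) (r2 / 2 % 2) (r2 / 4 % 2) (r2 / 8 % 2)
    (r2 / 16 % 2) (r2 / 32 % 2) (r2 / 64 % 2) (r2 / 128 % 2)
    (by omega) (by omega) (by omega) (by omega) (by omega) (by omega) (by omega) (by omega)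
    (by omega) (by omega) (by omega) (by omega) (by omega) (by omega) (by omega) (by omega)
  unfold mf; exact d

lemma mfd4 (r1 r2 : Int) : (2 * mf r1 + mf r2) / 256 % 4 = r1 / 16 % 2 * 2 + r2 / 16 % 2 := by
  obtain ⟨-, -, -, d, -⟩ := digit_extract (r1 % 2) (r1 / 2 % 2) (r1 / 4 % 2) (r1 / 8 % 2)
    (r1 / 16 % 2) (r1 / 32 % 2) (r1 / 64 % 2) (r1 / 128 % 2)
    (r2 % 2) (r2 / 2 % 2) (r2 / 4 % 2) (r2 / 8 % 2)
    (r2 / 16 % 2) (r2 / 32 % 2) (r2 / 64 % 2) (r2 / 128 % 2)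
    (by omega) (by omega) (by omega) (by omega) (by omega) (by omega) (by omega) (by omega)
    (by omega) (by omega) (by omega) (by omega) (by omega) (by omega) (by omega) (by omega)
  unfold mf; exact d

lemma mfd3 (r1 r2 : Int) : (2 * mf r1 + mf r2) / 64 % 4 = r1 / 8 % 2 * 2 + r2 / 8 % 2 := by
  obtain ⟨-, -, -, -, d, -⟩ := digit_extract (r1 % 2) (r1 / 2 % 2) (r1 / 4 % 2) (r1 / 8 % 2)
    (r1 / 16 % 2) (r1 / 32 % 2) (r1 / 64 % 2) (r1 / 128 % 2)
    (r2 % 2) (r2 / 2 % 2) (r2 / 4 % 2) (r2 / 8 % 2)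
    (r2 / 16 % 2) (r2 / 32 % 2) (r2 / 64 % 2) (r2 / 128 % 2)
    (by omega) (by omega) (by omega) (by omega) (by omega) (by omega) (by omega) (by omega)
    (by omega) (by omega) (by omega) (by omega) (by omega) (by omega) (by omega) (by omega)
  unfold mf; exact d

lemma mfd2 (r1 r2 : Int) : (2 * mf r1 + mf r2) / 16 % 4 = r1 / 4 % 2 * 2 + r2 / 4 % 2 := by
  obtain ⟨-, -, -, -, -, d, -⟩ := digit_extract (r1 % 2) (r1 / 2 % 2) (r1 / 4 % 2) (r1 / 8 % 2)
    (r1 / 16 % 2) (r1 / 32 % 2) (r1 / 64 % 2) (r1 / 128 % 2)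
    (r2 % 2) (r2 / 2 % 2) (r2 / 4 % 2) (r2 / 8 % 2)
    (r2 / 16 % 2) (r2 / 32 % 2) (r2 / 64 % 2) (r2 / 128 % 2)
    (by omega) (by omega) (by omega) (by omega) (by omega) (by omega) (by omega) (by omega)
    (by omega) (by omega) (by omega) (by omega) (by omega) (by omega) (by omega) (by omega)
  unfold mf; exact d

lemma mfd1 (r1 r2 : Int) : (2 * mf r1 + mf r2) / 4 % 4 = r1 / 2 % 2 * 2 + r2 / 2 % 2 := by
  obtain ⟨-, -, -, -, -, -, d, -⟩ := digit_extract (r1 % 2) (r1 / 2 % 2) (r1 / 4 % 2) (r1 / 8 % 2)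
    (r1 / 16 % 2) (r1 / 32 % 2) (r1 / 64 % 2) (r1 / 128 % 2)
    (r2 % 2) (r2 / 2 % 2) (r2 / 4 % 2) (r2 / 8 % 2)
    (r2 / 16 % 2) (r2 / 32 % 2) (r2 / 64 % 2) (r2 / 128 % 2)
    (by omega) (by omega) (by omega) (by omega) (by omega) (by omega) (by omega) (by omega)
    (by omega) (by omega) (by omega) (by omega) (by omega) (by omega) (by omega) (by omega)
  unfold mf; exact d

lemma mfd0 (r1 r2 : Int) : (2 * mf r1 + mf r2) % 4 = r1 % 2 * 2 + r2 % 2 := by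
  obtain ⟨-, -, -, -, -, -, -, d⟩ := digit_extract (r1 % 2) (r1 / 2 % 2) (r1 / 4 % 2) (r1 / 8 % 2)
    (r1 / 16 % 2) (r1 / 32 % 2) (r1 / 64 % 2) (r1 / 128 % 2)
    (r2 % 2) (r2 / 2 % 2) (r2 / 4 % 2) (r2 / 8 % 2)
    (r2 / 16 % 2) (r2 / 32 % 2) (r2 / 64 % 2) (r2 / 128 % 2)
    (by omega) (by omega) (by omega) (by omega) (by omega) (by omega) (by omega) (by omega)
    (by omega) (by omega) (by omega) (by omega) (by omega) (by omega) (by omega) (by omega)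
  unfold mf; exact d

-- the per-pair digit chunk of B equals the per-pair bit chunk of A
lemma bDigits_eq_aChunk (b1 b2 : Int) (out : List Int) :
    bDigits
      (2 * PySem.List.pyGetD mortonTable (PySem.Int.mod b1 256) 0
        + PySem.List.pyGetD mortonTable (PySem.Int.mod b2 256) 0) out
      = aChunk b1 b2 out := by
  have h256 : (0:Int) < 256 := by omega
  rw [PySem.Int.mod_eq_emod_of_pos h256, PySem.Int.mod_eq_emod_of_pos h256,
    morton_lookup _ (Int.emod_nonneg b1 (by omega)) (Int.emod_lt_of_pos b1 h256),
    morton_lookup _ (Int.emod_nonneg b2 (by omega)) (Int.emod_lt_of_pos b2 h256)]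
  unfold bDigits aChunk
  simp only [(by decide : PySem.List.pyRange 7 (-1) (-1) = [7, 6, 5, 4, 3, 2, 1, 0]),
    List.foldl_cons, List.foldl_nil]
  simp only [List.append_assoc, List.nil_append, List.cons_append,
    List.append_cancel_left_eq, List.cons.injEq, and_true]
  simp only [PySem.Int.band_one, PySem.Int.mod_eq_emod_of_pos (by omega : (0:Int) < 2),
    PySem.Int.mod_eq_emod_of_pos (by omega : (0:Int) < 4),
    (by decide : (2 * (7:Int)).toNat = 14), (by decide : (2 * (6:Int)).toNat = 12),
    (by decide : (2 * (5:Int)).toNat = 10), (by decide : (2 * (4:Int)).toNat = 8),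
    (by decide : (2 * (3:Int)).toNat = 6), (by decide : (2 * (2:Int)).toNat = 4),
    (by decide : (2 * (1:Int)).toNat = 2), (by decide : (2 * (0:Int)).toNat = 0),
    (by decide : Int.toNat 7 = 7), (by decide : Int.toNat 6 = 6),
    (by decide : Int.toNat 5 = 5), (by decide : Int.toNat 4 = 4),
    (by decide : Int.toNat 3 = 3), (by decide : Int.toNat 2 = 2),
    (by decide : Int.toNat 1 = 1), (by decide : Int.toNat 0 = 0)]
  simp only [Int.shiftRight_natCast_right, Int.shiftRight_eq_div_pow]
  push_cast
  simp only [Int.ediv_one]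
  rw [mfd7, mfd6, mfd5, mfd4, mfd3, mfd2, mfd1, mfd0]
  refine ⟨by omega, by omega, by omega, by omega, by omega, by omega, by omega, by omega⟩

-- B's digit loop only appends: it is the start list plus the fresh chunk
lemma bDigits_append (m : Int) (out : List Int) : bDigits m out = out ++ bDigits m [] := by
  unfold bDigits
  simp only [(by decide : PySem.List.pyRange 7 (-1) (-1) = [7, 6, 5, 4, 3, 2, 1, 0]),
    List.foldl_cons, List.foldl_nil]
  simp [List.append_assoc]

-- a foldl of appended chunks is a flatMap
lemma foldl_bDigits (F : Nat → Int) : ∀ (l : List Nat) (acc : List Int),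
    l.foldl (fun out k => bDigits (F k) out) acc = acc ++ l.flatMap (fun k => bDigits (F k) [])
  | [], acc => by simp
  | k :: t, acc => by
    rw [List.foldl_cons, foldl_bDigits F t, bDigits_append, List.flatMap_cons, List.append_assoc]

-- B as a Nat-indexed structural pass
def bM (bs : List Int) (k : Nat) : Int :=
  2 * PySem.List.pyGetD mortonTable (PySem.Int.mod (bs.getD (2 * k) 0) 256) 0
    + PySem.List.pyGetD mortonTable (PySem.Int.mod (bs.getD (2 * k + 1) 0) 256) 0

def bNat (bs : List Int) : List Int :=
  (List.range (bs.length / 2)).flatMap (fun k => bDigits (bM bs k) [])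

lemma alt_eq_bNat (bs : List Int) : convert_to_array1_alt bs = bNat bs := by
  have h2 : PySem.Int.floordiv (bs.length : Int) 2 = ((bs.length / 2 : Nat) : Int) := by
    exact_mod_cast PySem.Int.floordiv_natCast bs.length 2
  simp only [convert_to_array1_alt, bNat, h2, PySem.List.pyRange_one]
  rw [List.foldl_map, Int.sub_zero, Int.toNat_natCast]
  rw [List.foldl_ext _ (fun out k => bDigits (bM bs k) out) []
    (fun a k _ => by
      unfold bM
      have e1 : (2 : Int) * ((0:Int) + (k : Int)) = ((2 * k : Nat) : Int) := by push_cast; ring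
      have e2 : (2 : Int) * ((0:Int) + (k : Int)) + 1 = ((2 * k + 1 : Nat) : Int) := by
        push_cast; ring
      rw [e2, e1, PySem.List.pyGetD_natCast, PySem.List.pyGetD_natCast])]
  rw [foldl_bDigits (bM bs) _ [], List.nil_append]

lemma bNat_cons (b1 b2 : Int) (r : List Int) :
    bNat (b1 :: b2 :: r) = bDigits (bM (b1 :: b2 :: r) 0) [] ++ bNat r := by
  have hl : (b1 :: b2 :: r).length / 2 = r.length / 2 + 1 := by
    simp [List.length_cons]; omega
  rw [bNat, hl, List.range_succ_eq_map, List.flatMap_cons, List.flatMap_map]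
  congr 1

lemma aLoop_eq_bNat : ∀ (bs acc : List Int), aLoop acc bs = acc ++ bNat bs
  | [], acc => by simp [aLoop, bNat]
  | [x], acc => by simp [aLoop, bNat]
  | b1 :: b2 :: r, acc => by
    rw [aLoop, ← bDigits_eq_aChunk b1 b2 acc, aLoop_eq_bNat r, bDigits_append, bNat_cons]
    simp only [bM, List.getD_cons_zero, Nat.mul_zero, List.getD_cons_succ, List.append_assoc]

-- ===== VERDICT (by name: the statement is the Claim_ definition above) =====
theorem convert_to_array1_spec : Claim_equal_convert_to_array1 := by
  intro bs _ _
  unfold Spec_convert_to_array1 convert_to_array1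
  rw [aLoop_eq_bNat, alt_eq_bNat, List.nil_append]
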